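-- pv_equiv track=rewrite | github.com/marcoce005/Python | poli/esercitazione10/es10.2.3/es10.2.3.py | create_chiper
-- ===== SOURCE A (Python) =====
-- def create_chiper(k):
--     m = []
--     n_ascii = 65
--     cp_k = k[:]
--
--     for r in range(5):
--         l = []
--         for i in range(5):
--             if len(k) > 0:
--                 l.append(k[0])
--                 k.pop(0)
--             else:
--                 while chr(n_ascii) in cp_k or chr(n_ascii) == "J":
--                     n_ascii += 1
--                 l.append(chr(n_ascii))
--                 n_ascii += 1
--         m.append(l)
--
--     return m
-- ===== SOURCE B (Python) =====
-- def create_chiper(k):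
--     cp_k = k[:]
--     flat = k[:25]
--     del k[:25]
--     n_ascii = 65
--     while len(flat) < 25:
--         c = chr(n_ascii)
--         n_ascii += 1
--         if c not in cp_k and c != "J":
--             flat.append(c)
--     return [flat[i * 5:(i + 1) * 5] for i in range(5)]
-- ===== Notes on version B (the rewrite author's own statement) =====
-- stated objective: simpler
-- what changed: B builds one flat 25-character list (key prefix taken in one slice, then filler letters appended by a single while loop over a monotone ascii counter) and reshapes it into 5 rows, instead of A's nested 5x5 row/cell loops with an interleaved pop-or-fill branch and inner skip loop in every cell.
import Mathlib
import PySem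

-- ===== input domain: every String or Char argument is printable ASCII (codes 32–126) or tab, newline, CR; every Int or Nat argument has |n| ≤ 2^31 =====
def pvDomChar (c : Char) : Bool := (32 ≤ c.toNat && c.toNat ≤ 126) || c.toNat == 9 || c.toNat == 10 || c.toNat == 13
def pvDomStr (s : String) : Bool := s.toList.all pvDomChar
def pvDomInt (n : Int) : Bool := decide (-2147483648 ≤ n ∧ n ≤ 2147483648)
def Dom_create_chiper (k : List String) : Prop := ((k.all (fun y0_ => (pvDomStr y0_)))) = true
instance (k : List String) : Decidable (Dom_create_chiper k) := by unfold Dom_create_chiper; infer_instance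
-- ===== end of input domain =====

-- B builds one flat 25-character list (key prefix + filler letters) and chunks it into rows,
-- instead of A's nested row/cell loops with interleaved pop/fill; return values agree (A also
-- mutates its argument list in place, B's Python mirrors that mutation; only the return value is proved here).

-- ===== PORT A =====
-- chr(n) as a one-character string
def chrS (n : Nat) : String := String.ofList [Char.ofNat n]

-- A's inner `while chr(n_ascii) in cp_k or chr(n_ascii) == "J": n_ascii += 1`, with fuel;
-- 128 steps of fuel always suffice on the printable-ASCII domain (proved in the lemmas below)
def skipWhile (cp : List String) : Nat → Nat → Nat
  | 0, n => n
  | f+1, n => if chrS n ∈ cp ∨ chrS n = "J" then skipWhile cp f (n+1) else n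

-- one iteration of A's inner `for i in range(5)` body: pop k's head, or emit the next free letter
def cellA (cp : List String) : List String × Nat → (List String × Nat) × String
  | (x :: rest, n) => ((rest, n), x)
  | ([], n) => let n' := skipWhile cp 128 n; (([], n' + 1), chrS n')

def innerStepA (cp : List String) (st2 : List String × (List String × Nat)) (_ : Int) :
    List String × (List String × Nat) :=
  let p := cellA cp st2.2
  (st2.1 ++ [p.2], p.1)

def outerStepA (cp : List String) (st : List (List String) × (List String × Nat)) (_ : Int) :
    List (List String) × (List String × Nat) :=
  let inner := (PySem.List.pyRange 0 5 1).foldl (innerStepA cp) (([] : List String), st.2)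
  (st.1 ++ [inner.1], inner.2)

def create_chiper (k : List String) : List (List String) :=
  let cp_k := k
  let res := (PySem.List.pyRange 0 5 1).foldl (outerStepA cp_k)
      (([] : List (List String)), (k, 65))
  res.1

-- ===== PORT B =====
-- B's `while len(flat) < 25: c = chr(n); n += 1; if c not in cp_k and c != "J": flat.append(c)`,
-- with fuel; 128 steps of fuel always suffice on the printable-ASCII domain (proved below)
def fillB (cp : List String) : Nat → Nat → List String → List String
  | 0, _, flat => flat
  | f+1, n, flat =>
    if flat.length < 25 then
      let c := chrS n
      if c ∉ cp ∧ c ≠ "J" then fillB cp f (n+1) (flat ++ [c])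
      else fillB cp f (n+1) flat
    else flat

def create_chiper_alt (k : List String) : List (List String) :=
  let cp_k := k
  let flat := fillB cp_k 128 65 (PySem.List.slice k none (some 25))
  (PySem.List.pyRange 0 5 1).map
    (fun i => PySem.List.slice flat (some (i * 5)) (some ((i + 1) * 5)))

-- ===== PRECONDITION & SPEC =====
def Spec_create_chiper (k : List String) (out : List (List String)) : Prop := out = create_chiper_alt k
instance (k : List String) (out : List (List String)) : Decidable (Spec_create_chiper k out) := by unfold Spec_create_chiper; infer_instance

-- ===== CLAIM (what is proved, stated in full; the proofs are below) =====
def Claim_equal_create_chiper : Prop := ∀ (k : List String), Dom_create_chiper k → Spec_create_chiper k (create_chiper k)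

-- ===== LEMMAS AND PROOFS =====

-- the filler stream A produces: m letters, advancing the monotone counter through skipWhile
def emitA (cp : List String) : Nat → Nat → List String
  | _, 0 => []
  | n, m+1 => let n' := skipWhile cp 128 n; chrS n' :: emitA cp (n' + 1) m

-- m iterations of A's cell step: the emitted characters together with the final state
def cellsA (cp : List String) : List String × Nat → Nat → List String × (List String × Nat)
  | st, 0 => ([], st)
  | st, m+1 =>
    let p := cellA cp st
    let q := cellsA cp p.1 m
    (p.2 :: q.1, q.2)

-- on the printable domain no character of code ≥ 127 can be skipped
def HiFree (cp : List String) : Prop := ∀ n, 127 ≤ n → ¬(chrS n ∈ cp ∨ chrS n = "J")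

lemma pyRange5 : PySem.List.pyRange 0 5 1 = [0, 1, 2, 3, 4] := by decide

lemma skip_id {cp : List String} {n : Nat} (h : ¬(chrS n ∈ cp ∨ chrS n = "J")) :
    ∀ f, skipWhile cp f n = n := by
  intro f; cases f <;> simp [skipWhile, h]

lemma skip_fuel {cp : List String} (hH : HiFree cp) :
    ∀ f g n, 127 ≤ n + f → f ≤ g → skipWhile cp f n = skipWhile cp g n := by
  intro f
  induction f with
  | zero => intro g n hn _; rw [skipWhile, skip_id (hH n (by omega)) g]
  | succ f ih =>
    intro g n hn hfg
    obtain ⟨g', rfl⟩ : ∃ g', g = g' + 1 := ⟨g - 1, by omega⟩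
    by_cases hc : chrS n ∈ cp ∨ chrS n = "J"
    · simp only [skipWhile, if_pos hc]
      exact ih g' (n + 1) (by omega) (by omega)
    · simp only [skipWhile, if_neg hc]

lemma skip_shift {cp : List String} (hH : HiFree cp) {n : Nat}
    (hc : chrS n ∈ cp ∨ chrS n = "J") :
    skipWhile cp 128 n = skipWhile cp 128 (n + 1) := by
  show skipWhile cp (127 + 1) n = _
  rw [skipWhile, if_pos hc]
  exact skip_fuel hH 127 128 (n + 1) (by omega) (by omega)

lemma fill_emit {cp : List String} (hH : HiFree cp) :
    ∀ f n (flat : List String), (25 - flat.length) + (127 - n) ≤ f →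
      fillB cp f n flat = flat ++ emitA cp n (25 - flat.length) := by
  intro f
  induction f with
  | zero =>
    intro n flat hle
    have h0 : 25 - flat.length = 0 := by omega
    simp [fillB, h0, emitA]
  | succ f ih =>
    intro n flat hle
    by_cases hl : flat.length < 25
    · by_cases hc : chrS n ∈ cp ∨ chrS n = "J"
      · have hn : n ≤ 126 := by
          by_contra h; exact hH n (by omega) hc
        have hnot : ¬(chrS n ∉ cp ∧ chrS n ≠ "J") := by tauto
        rw [fillB, if_pos hl]
        simp only [if_neg hnot]
        rw [ih (n + 1) flat (by omega)]
        obtain ⟨m, hm⟩ : ∃ m, 25 - flat.length = m + 1 := ⟨24 - flat.length, by omega⟩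
        rw [hm, emitA, emitA, skip_shift hH hc]
      · have hyes : chrS n ∉ cp ∧ chrS n ≠ "J" := by tauto
        rw [fillB, if_pos hl]
        simp only [if_pos hyes]
        rw [ih (n + 1) (flat ++ [chrS n]) (by simp; omega)]
        obtain ⟨m, hm⟩ : ∃ m, 25 - flat.length = m + 1 := ⟨24 - flat.length, by omega⟩
        have hm' : 25 - (flat ++ [chrS n]).length = m := by simp; omega
        rw [hm, hm', emitA, skip_id hc, List.append_assoc]
        rfl
    · have h0 : 25 - flat.length = 0 := by omega
      rw [fillB, if_neg hl]
      simp [h0, emitA]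

lemma length_cellsA (cp : List String) : ∀ m st, ((cellsA cp st m).1).length = m := by
  intro m
  induction m with
  | zero => intro st; rfl
  | succ m ih => intro st; simp [cellsA, ih]

lemma cellsA_split (cp : List String) :
    ∀ a b st, cellsA cp st (a + b) =
      ((cellsA cp st a).1 ++ (cellsA cp (cellsA cp st a).2 b).1,
        (cellsA cp (cellsA cp st a).2 b).2) := by
  intro a
  induction a with
  | zero => intro b st; simp [cellsA]
  | succ a ih =>
    intro b st
    have : a + 1 + b = (a + b) + 1 := by omega
    rw [this]
    simp only [cellsA]
    rw [ih b (cellA cp st).1]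
    simp

lemma cellsA_stream (cp : List String) :
    ∀ m (k : List String) (n : Nat),
      (cellsA cp (k, n) m).1 = k.take m ++ emitA cp n (m - k.length) := by
  intro m
  induction m with
  | zero => intro k n; simp [cellsA, emitA]
  | succ m ih =>
    intro k n
    cases k with
    | nil =>
      simp only [cellsA, cellA, List.take_nil, List.nil_append, List.length_nil, Nat.sub_zero]
      rw [emitA]
      simp only [List.cons.injEq, true_and]
      rw [ih [] _]
      simp
    | cons x rest =>
      simp only [cellsA, cellA, List.take_succ_cons, List.cons_append, List.cons.injEq, true_and]
      rw [ih rest n]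
      simp [Nat.succ_sub_succ]

lemma foldl_innerStepA (cp : List String) :
    ∀ (L : List Int) (acc : List String) (st : List String × Nat),
      L.foldl (innerStepA cp) (acc, st) =
        (acc ++ (cellsA cp st L.length).1, (cellsA cp st L.length).2) := by
  intro L
  induction L with
  | nil => intro acc st; simp [cellsA]
  | cons a L ih =>
    intro acc st
    simp only [List.foldl_cons, List.length_cons]
    rw [show innerStepA cp (acc, st) a = (acc ++ [(cellA cp st).2], (cellA cp st).1) from rfl]
    rw [ih]
    simp [cellsA]

lemma inner_eq (cp : List String) (acc : List String) (st : List String × Nat) :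
    (PySem.List.pyRange 0 5 1).foldl (innerStepA cp) (acc, st) =
      (acc ++ (cellsA cp st 5).1, (cellsA cp st 5).2) := by
  rw [foldl_innerStepA]
  rw [show (PySem.List.pyRange 0 5 1).length = 5 by rw [pyRange5]; rfl]

-- on the printable-ASCII domain, codes ≥ 127 are never skipped
lemma dom_hifree {k : List String} (hd : Dom_create_chiper k) : HiFree k := by
  intro n hn hc
  have ht : (Char.ofNat n).toNat = n ∨ (Char.ofNat n).toNat = 0 := by
    rw [Char.toNat_ofNat]; split
    · exact Or.inl rfl
    · exact Or.inr rfl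
  have hnd : ¬ pvDomChar (Char.ofNat n) = true := by
    unfold pvDomChar
    simp only [Bool.or_eq_true, Bool.and_eq_true, decide_eq_true_eq, beq_iff_eq]
    rcases ht with h | h <;> rw [h] <;> omega
  rcases hc with hmem | hj
  · unfold Dom_create_chiper at hd
    rw [List.all_eq_true] at hd
    have h1 := hd _ hmem
    unfold pvDomStr at h1
    rw [List.all_eq_true] at h1
    exact hnd (h1 _ (by simp [chrS]))
  · have hJ : Char.ofNat n = 'J' := by
      have h2 := congrArg String.toList hj
      simpa [chrS] using h2
    have h3 := congrArg Char.toNat hJ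
    rw [Char.toNat_ofNat, show 'J'.toNat = 74 from rfl] at h3
    by_cases hv : n.isValidChar
    · rw [if_pos hv] at h3; omega
    · rw [if_neg hv] at h3; exact absurd h3 (by decide)

lemma take_parts {a b : List String} (h : a.length = 5) :
    (a ++ b).take 5 = a ∧ (a ++ b).drop 5 = b := by
  constructor
  · rw [← h, List.take_left]
  · rw [← h, List.drop_left]

-- ===== VERDICT (by name: the statement is the Claim_ definition above) =====
theorem create_chiper_spec : Claim_equal_create_chiper := by
  intro k hd
  have hH : HiFree k := dom_hifree hd
  unfold Spec_create_chiper
  -- B side: the flat list is exactly A's 25-cell stream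
  have hslice : PySem.List.slice k none (some (25 : Int)) = k.take 25 := by
    rw [PySem.List.slice_to k (by omega)]; rfl
  have hlen_take : (k.take 25).length = min 25 k.length := by simp
  have hfill : fillB k 128 65 (k.take 25) =
      k.take 25 ++ emitA k 65 (25 - (k.take 25).length) := by
    exact fill_emit hH 128 65 (k.take 25) (by omega)
  have hsub : 25 - (k.take 25).length = 25 - k.length := by
    rw [hlen_take]; omega
  set F : List String := (cellsA k (k, 65) 25).1 with hF
  have hflat : fillB k 128 65 (PySem.List.slice k none (some (25 : Int))) = F := by
    rw [hslice, hfill, hsub, hF, cellsA_stream]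
  -- split A's 25-cell stream into five rows of five
  set st0 : List String × Nat := (k, 65) with hst0
  set st1 := (cellsA k st0 5).2 with hst1
  set st2 := (cellsA k st1 5).2 with hst2
  set st3 := (cellsA k st2 5).2 with hst3
  set st4 := (cellsA k st3 5).2 with hst4
  set c0 := (cellsA k st0 5).1 with hc0
  set c1 := (cellsA k st1 5).1 with hc1
  set c2 := (cellsA k st2 5).1 with hc2
  set c3 := (cellsA k st3 5).1 with hc3
  set c4 := (cellsA k st4 5).1 with hc4
  have hsplit : F = c0 ++ (c1 ++ (c2 ++ (c3 ++ c4))) := by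
    rw [hF]
    rw [show (25 : Nat) = 5 + 20 from rfl, cellsA_split]
    rw [show (20 : Nat) = 5 + 15 from rfl, cellsA_split]
    rw [show (15 : Nat) = 5 + 10 from rfl, cellsA_split]
    rw [show (10 : Nat) = 5 + 5 from rfl, cellsA_split]
  have l0 : c0.length = 5 := length_cellsA k 5 st0
  have l1 : c1.length = 5 := length_cellsA k 5 st1
  have l2 : c2.length = 5 := length_cellsA k 5 st2
  have l3 : c3.length = 5 := length_cellsA k 5 st3
  have l4 : c4.length = 5 := length_cellsA k 5 st4
  -- A side: unfold the five outer iterations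
  have hA : ((PySem.List.pyRange 0 5 1).foldl (outerStepA k)
      (([] : List (List String)), (k, 65))).1 = [c0, c1, c2, c3, c4] := by
    rw [pyRange5]
    simp only [List.foldl_cons, List.foldl_nil, outerStepA, inner_eq, List.nil_append]
    rfl
  have hAdef : create_chiper k = ((PySem.List.pyRange 0 5 1).foldl (outerStepA k)
      (([] : List (List String)), (k, 65))).1 := rfl
  have hBdef : create_chiper_alt k = (PySem.List.pyRange 0 5 1).map
      (fun i => PySem.List.slice (fillB k 128 65 (PySem.List.slice k none (some 25)))
        (some (i * 5)) (some ((i + 1) * 5))) := rfl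
  rw [hAdef, hBdef, hA, pyRange5]
  simp only [List.map_cons, List.map_nil, hflat]
  rw [hsplit]
  -- B side: the five slices of the flat list are the five rows
  have t0 := take_parts (b := c1 ++ (c2 ++ (c3 ++ c4))) l0
  have t1 := take_parts (b := c2 ++ (c3 ++ c4)) l1
  have t2 := take_parts (b := c3 ++ c4) l2
  have t3 := take_parts (b := c4) l3
  norm_num
  rw [PySem.List.slice_to _ (by omega),
      PySem.List.slice_toNat _ (by omega) (by omega),
      PySem.List.slice_toNat _ (by omega) (by omega),
      PySem.List.slice_toNat _ (by omega) (by omega),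
      PySem.List.slice_toNat _ (by omega) (by omega)]
  simp only [show Int.toNat 5 = 5 from rfl, show Int.toNat 10 = 10 from rfl,
    show Int.toNat 15 = 15 from rfl, show Int.toNat 20 = 20 from rfl,
    show Int.toNat 25 = 25 from rfl]
  norm_num
  refine ⟨?_, ?_, ?_, ?_, ?_⟩
  · rw [t0.1]
  · rw [t0.2, t1.1]
  · rw [show (10 : Nat) = 5 + 5 from rfl, ← List.drop_drop, t0.2, t1.2, t2.1]
  · rw [show (15 : Nat) = 5 + 10 from rfl, ← List.drop_drop,
        show (10 : Nat) = 5 + 5 from rfl, ← List.drop_drop, t0.2, t1.2, t2.2, t3.1]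
  · rw [show (20 : Nat) = 5 + 15 from rfl, ← List.drop_drop,
        show (15 : Nat) = 5 + 10 from rfl, ← List.drop_drop,
        show (10 : Nat) = 5 + 5 from rfl, ← List.drop_drop, t0.2, t1.2, t2.2, t3.2,
        ← l4, List.take_length]
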